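-- pv_equiv track=rewrite | github.com/zheng-gao/ez_code | src/ezcode/math/permutation.py | selected_permutation_size
-- ===== SOURCE A (Python) =====
-- def selected_permutation_size(total_size: int, selection_size: int) -> int:
--     """ Not for duplicate items: P(N,r) = N!/(N-r)! """
--     if selection_size > total_size:
--         raise ValueError(f"selection_size:{selection_size} cannot be greater than total_size:{total_size}")
--     if selection_size < 0:
--         raise ValueError(f"selection_size:{selection_size} cannot be negative")
--     result = 1
--     for i in range(total_size - selection_size + 1, total_size + 1):
--         result *= i
--     return result
-- ===== SOURCE B (Python) =====
-- def selected_permutation_size(total_size: int, selection_size: int) -> int: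
--     """ Not for duplicate items: P(N,r) = N!/(N-r)! """
--     if selection_size > total_size:
--         raise ValueError(f"selection_size:{selection_size} cannot be greater than total_size:{total_size}")
--     if selection_size < 0:
--         raise ValueError(f"selection_size:{selection_size} cannot be negative")
--
--     def prod_range(lo, hi):
--         # product of the integers in [lo, hi), by balanced divide and conquer
--         if hi - lo == 0:
--             return 1
--         if hi - lo == 1:
--             return lo
--         mid = (lo + hi) // 2
--         return prod_range(lo, mid) * prod_range(mid, hi)
--
--     return prod_range(total_size - selection_size + 1, total_size + 1)
-- ===== Notes on version B (the rewrite author's own statement) =====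
-- stated objective: alternative
-- what changed: Replaces A's left-to-right accumulating loop over range(N-r+1, N+1) by a recursive balanced divide-and-conquer product of the same range, which keeps intermediate big-int operands balanced in size.
import Mathlib
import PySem

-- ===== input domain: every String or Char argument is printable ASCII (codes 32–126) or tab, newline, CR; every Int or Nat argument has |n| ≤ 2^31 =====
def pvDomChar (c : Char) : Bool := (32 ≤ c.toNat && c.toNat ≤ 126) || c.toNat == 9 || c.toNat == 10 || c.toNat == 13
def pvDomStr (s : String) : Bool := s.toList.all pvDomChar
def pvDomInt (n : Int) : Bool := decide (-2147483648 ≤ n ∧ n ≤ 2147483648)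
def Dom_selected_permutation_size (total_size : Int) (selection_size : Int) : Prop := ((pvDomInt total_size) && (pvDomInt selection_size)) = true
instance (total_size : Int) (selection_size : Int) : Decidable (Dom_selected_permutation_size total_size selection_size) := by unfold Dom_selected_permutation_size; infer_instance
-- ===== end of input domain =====

-- B computes the same product of range(N-r+1, N+1) by balanced divide and conquer
-- instead of A's left-to-right accumulating loop.

-- ===== PORT A =====
-- result = 1; for i in range(total_size - selection_size + 1, total_size + 1): result *= i
def selected_permutation_size (total_size : Int) (selection_size : Int) : Int :=
  (PySem.List.pyRange (total_size - selection_size + 1) (total_size + 1) 1).foldl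
    (fun result i => result * i) 1

-- ===== PORT B =====
-- helper `prod_range` of Source B; the first guard is `hi - lo ≤ 0` where Python tests `hi - lo == 0`:
-- a totality guard only (Source B never calls prod_range with hi < lo)
def pvProdRangeB (lo hi : Int) : Int :=
  if hi - lo ≤ 0 then 1
  else if hi - lo = 1 then lo
  else
    let mid := PySem.Int.floordiv (lo + hi) 2
    pvProdRangeB lo mid * pvProdRangeB mid hi
termination_by (hi - lo).toNat
decreasing_by
  all_goals
    simp only [PySem.Int.floordiv_eq_ediv_of_pos (by norm_num : (0:Int) < 2)] at *
    omega

def selected_permutation_size_alt (total_size : Int) (selection_size : Int) : Int :=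
  pvProdRangeB (total_size - selection_size + 1) (total_size + 1)

-- ===== PRECONDITION & SPEC =====
-- exactly the inputs where A returns (otherwise A raises ValueError; B raises the same way)
def Pre_selected_permutation_size (total_size : Int) (selection_size : Int) : Prop :=
  selection_size ≤ total_size ∧ 0 ≤ selection_size
instance (total_size : Int) (selection_size : Int) : Decidable (Pre_selected_permutation_size total_size selection_size) := by unfold Pre_selected_permutation_size; infer_instance

def pvWitness_selected_permutation_size : Int × Int := (5, 2)

def Spec_selected_permutation_size (total_size : Int) (selection_size : Int) (out : Int) : Prop := out = selected_permutation_size_alt total_size selection_size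
instance (total_size : Int) (selection_size : Int) (out : Int) : Decidable (Spec_selected_permutation_size total_size selection_size out) := by unfold Spec_selected_permutation_size; infer_instance

-- ===== CLAIM (what is proved, stated in full; the proofs are below) =====
def Claim_equal_selected_permutation_size : Prop := ∀ (total_size : Int) (selection_size : Int), Dom_selected_permutation_size total_size selection_size → Pre_selected_permutation_size total_size selection_size → Spec_selected_permutation_size total_size selection_size (selected_permutation_size total_size selection_size)

-- ===== LEMMAS AND PROOFS =====

-- pull a foldl-product's initial accumulator out front
theorem pv_foldl_mul_init (l : List Int) (c : Int) :
    l.foldl (fun r i => r * i) c = c * l.foldl (fun r i => r * i) 1 := by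
  induction l generalizing c with
  | nil => simp
  | cons x xs ih =>
    simp only [List.foldl_cons]
    rw [ih (c * x), ih (1 * x)]
    ring

-- product of range(a, b) with init 1
def pvProd (a b : Int) : Int :=
  (PySem.List.pyRange a b 1).foldl (fun r i => r * i) 1

theorem pvProd_split (a m b : Int) (h1 : a ≤ m) (h2 : m ≤ b) :
    pvProd a b = pvProd a m * pvProd m b := by
  unfold pvProd
  rw [PySem.List.pyRange_one_append a m b h1 h2, List.foldl_append, pv_foldl_mul_init]

theorem pvProdRangeB_eq (lo hi : Int) : pvProdRangeB lo hi = pvProd lo hi := by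
  rw [pvProdRangeB]
  split_ifs with h0 h1
  · unfold pvProd
    rw [PySem.List.pyRange_one_eq_nil (by omega)]
    rfl
  · have : hi = lo + 1 := by omega
    subst this
    unfold pvProd
    rw [PySem.List.pyRange_one_singleton]
    simp
  · have h2 : (0:Int) < 2 := by norm_num
    have hm : PySem.Int.floordiv (lo + hi) 2 = (lo + hi) / 2 :=
      PySem.Int.floordiv_eq_ediv_of_pos h2
    show pvProdRangeB lo (PySem.Int.floordiv (lo + hi) 2) *
        pvProdRangeB (PySem.Int.floordiv (lo + hi) 2) hi = pvProd lo hi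
    rw [pvProdRangeB_eq lo _, pvProdRangeB_eq _ hi,
        ← pvProd_split lo _ hi (by rw [hm]; omega) (by rw [hm]; omega)]
termination_by (hi - lo).toNat
decreasing_by
  all_goals
    simp only [PySem.Int.floordiv_eq_ediv_of_pos (by norm_num : (0:Int) < 2)] at *
    omega

-- ===== VERDICT (by name: the statement is the Claim_ definition above) =====
theorem selected_permutation_size_spec : Claim_equal_selected_permutation_size := by
  intro t s _ hpre
  obtain ⟨hst, hs⟩ := hpre
  show selected_permutation_size t s = selected_permutation_size_alt t s
  unfold selected_permutation_size selected_permutation_size_alt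
  rw [pvProdRangeB_eq]
  rfl
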